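-- pv_equiv track=rewrite | github.com/abhmul/toxic-comments | src2/process_data.py | reformat_texts
-- ===== SOURCE A (Python) =====
-- def reformat_texts(flat_texts, text_starts):
--     assert len(flat_texts) == len(text_starts)
--     texts = []
--     cur_text = []
--     for i, sent in enumerate(flat_texts):
--         cur_text.append(sent)
--         # If this is our last text or marks the end of a text
--         if i == (len(flat_texts) - 1) or text_starts[i+1]:
--             # Add the current text and reset it
--             texts.append(cur_text)
--             cur_text = []
--     return texts
-- ===== SOURCE B (Python) =====
-- def reformat_texts(flat_texts, text_starts):
--     assert len(flat_texts) == len(text_starts)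
--     n = len(flat_texts)
--     texts = []
--     i = 0
--     # span-by-index: each text runs from i up to (but not including) the next flagged start
--     while i < n:
--         j = i + 1
--         while j < n and not text_starts[j]:
--             j += 1
--         texts.append(flat_texts[i:j])
--         i = j
--     return texts
-- ===== Notes on version B (the rewrite author's own statement) =====
-- stated objective: alternative
-- what changed: B replaces A's accumulate-and-flush fold over enumerated sentences with an index-based span scan: an outer while loop finds the end j of each text with an inner while over the start flags and emits the slice flat_texts[i:j] in one step.
import Mathlib
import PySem

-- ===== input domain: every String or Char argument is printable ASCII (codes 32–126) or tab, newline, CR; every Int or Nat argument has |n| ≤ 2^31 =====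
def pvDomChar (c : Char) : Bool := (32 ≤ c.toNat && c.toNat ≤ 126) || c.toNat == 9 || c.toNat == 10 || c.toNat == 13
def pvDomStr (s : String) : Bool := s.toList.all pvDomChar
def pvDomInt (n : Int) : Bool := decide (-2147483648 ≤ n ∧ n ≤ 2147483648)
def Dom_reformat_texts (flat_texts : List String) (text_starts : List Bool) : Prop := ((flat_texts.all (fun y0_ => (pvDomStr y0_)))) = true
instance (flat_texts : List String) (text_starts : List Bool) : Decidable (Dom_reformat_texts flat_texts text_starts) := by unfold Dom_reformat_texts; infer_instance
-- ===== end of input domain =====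

-- B replaces A's accumulate-and-flush fold over enumerated sentences with an index-based span
-- scan (outer while finds each text's end j via an inner while over the start flags, then emits
-- the slice flat_texts[i:j]); an alternative decomposition of the same linear pass, not faster.


-- ===== PORT A =====
-- for i, sent in enumerate(flat_texts): cur_text.append(sent); flush if i == len-1 or text_starts[i+1]
def reformat_texts (flat_texts : List String) (text_starts : List Bool) : List (List String) :=
  ((PySem.List.enumerate flat_texts).foldl
    (fun (s : List (List String) × List String) (p : Int × String) =>
      let cur_text := s.2 ++ [p.2]
      -- `text_starts[i+1]` is only reached when i < len-1; inside Pre_ the index is then in range,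
      -- so `.getD false` never papers over an IndexError
      if p.1 = (flat_texts.length : Int) - 1 ∨ (PySem.List.pyGet? text_starts (p.1 + 1)).getD false = true
      then (s.1 ++ [cur_text], ([] : List String)) else (s.1, cur_text))
    ([], [])).1

-- ===== PORT B =====
-- inner `while j < n and not text_starts[j]: j += 1`; under Pre_ the index j is in range whenever
-- it is read (j < n = len(text_starts)), so `.getD false` never papers over an IndexError
def pvInnerB (n : Nat) (text_starts : List Bool) (j : Nat) : Nat :=
  if j < n then
    if (PySem.List.pyGet? text_starts (j : Int)).getD false = false then pvInnerB n text_starts (j + 1)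
    else j
  else j
termination_by n - j

-- the inner while never moves j backwards (cited by pvOuterB's decreasing_by)
theorem pvInnerB_ge (n : Nat) (ts : List Bool) (j : Nat) : j ≤ pvInnerB n ts j := by
  unfold pvInnerB
  split
  · split
    · exact le_trans (Nat.le_succ j) (pvInnerB_ge n ts (j + 1))
    · exact le_refl j
  · exact le_refl j
termination_by n - j

-- outer `while i < n: j = …; texts.append(flat_texts[i:j]); i = j`
def pvOuterB (flat_texts : List String) (text_starts : List Bool) (n : Nat) (i : Nat)
    (texts : List (List String)) : List (List String) :=
  if i < n then
    let j := pvInnerB n text_starts (i + 1)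
    pvOuterB flat_texts text_starts n j (texts ++ [PySem.List.slice flat_texts (some (i : Int)) (some (j : Int))])
  else texts
termination_by n - i
decreasing_by have := pvInnerB_ge n text_starts (i + 1); omega

def reformat_texts_alt (flat_texts : List String) (text_starts : List Bool) : List (List String) :=
  pvOuterB flat_texts text_starts flat_texts.length 0 []

-- ===== PRECONDITION & SPEC =====
-- Pre_: the `assert len(flat_texts) == len(text_starts)` in A (and B) raises AssertionError otherwise
def Pre_reformat_texts (flat_texts : List String) (text_starts : List Bool) : Prop :=
  flat_texts.length = text_starts.length
instance (flat_texts : List String) (text_starts : List Bool) : Decidable (Pre_reformat_texts flat_texts text_starts) := by unfold Pre_reformat_texts; infer_instance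
def pvWitness_reformat_texts : List String × List Bool := (["a", "b", "c"], [true, false, true])

def Spec_reformat_texts (flat_texts : List String) (text_starts : List Bool) (out : List (List String)) : Prop := out = reformat_texts_alt flat_texts text_starts
instance (flat_texts : List String) (text_starts : List Bool) (out : List (List String)) : Decidable (Spec_reformat_texts flat_texts text_starts out) := by unfold Spec_reformat_texts; infer_instance

-- ===== CLAIM (what is proved, stated in full; the proofs are below) =====
def Claim_equal_reformat_texts : Prop := ∀ (flat_texts : List String) (text_starts : List Bool), Dom_reformat_texts flat_texts text_starts → Pre_reformat_texts flat_texts text_starts → Spec_reformat_texts flat_texts text_starts (reformat_texts flat_texts text_starts)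

-- ===== LEMMAS AND PROOFS =====

-- Reference recursion for A's loop over the suffix of sentences still to process, where
-- `ts` is the list of lookahead flags (text_starts from the next index on) and `cur` the open group.
def pvAR : List String → List Bool → List String → List (List String)
  | [], _, _ => []
  | [s], _, cur => [cur ++ [s]]
  | s :: s2 :: fs, b :: ts, cur =>
      if b then (cur ++ [s]) :: pvAR (s2 :: fs) ts [] else pvAR (s2 :: fs) ts (cur ++ [s])
  | _ :: _ :: _, [], _ => []          -- unreachable under Pre_

-- unfolding equations for pvInnerB in the three relevant situations
theorem pvInnerB_stop (n : Nat) (ts : List Bool) (j : Nat) (h : ¬ j < n) :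
    pvInnerB n ts j = j := by unfold pvInnerB; rw [if_neg h]

theorem pvInnerB_true (n : Nat) (ts : List Bool) (j : Nat) (h : j < n)
    (hb : (PySem.List.pyGet? ts (j : Int)).getD false = true) :
    pvInnerB n ts j = j := by
  unfold pvInnerB; rw [if_pos h, if_neg (by simp only [hb]; simp)]

theorem pvInnerB_false (n : Nat) (ts : List Bool) (j : Nat) (h : j < n)
    (hb : (PySem.List.pyGet? ts (j : Int)).getD false = false) :
    pvInnerB n ts j = pvInnerB n ts (j + 1) := by
  conv_lhs => unfold pvInnerB
  rw [if_pos h, if_pos hb]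

-- key bridge: pvAR on the suffix from i equals one emitted span (up to the inner while's j)
-- followed by pvAR restarted at j (if anything is left)
theorem pvAR_span (fs : List String) (ts : List Bool) (i : Nat) (cur : List String)
    (hlen : fs.length = ts.length) (hi : i < fs.length) :
    pvAR (fs.drop i) (ts.drop (i + 1)) cur =
      (cur ++ (fs.drop i).take (pvInnerB fs.length ts (i + 1) - i)) ::
        (if pvInnerB fs.length ts (i + 1) < fs.length then
          pvAR (fs.drop (pvInnerB fs.length ts (i + 1)))
               (ts.drop (pvInnerB fs.length ts (i + 1) + 1)) []
        else []) := by
  have hdropf : fs.drop i = fs[i] :: fs.drop (i + 1) := (List.getElem_cons_drop hi).symm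
  by_cases hlast : i + 1 < fs.length
  · -- at least two sentences remain
    have hts : i + 1 < ts.length := by omega
    have hdropf2 : fs.drop (i + 1) = fs[i+1] :: fs.drop (i + 2) :=
      (List.getElem_cons_drop hlast).symm
    have hdropt : ts.drop (i + 1) = ts[i+1] :: ts.drop (i + 2) :=
      (List.getElem_cons_drop hts).symm
    have hget : (PySem.List.pyGet? ts ((i + 1 : Nat) : Int)).getD false = ts[i+1] := by
      rw [PySem.List.pyGet?_natCast, List.getElem?_eq_getElem hts]; rfl
    by_cases hb : ts[i+1] = true
    · -- flag true: the span ends right here, j = i+1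
      have hj : pvInnerB fs.length ts (i + 1) = i + 1 :=
        pvInnerB_true _ _ _ hlast (by rw [hget, hb])
      rw [hdropf, hdropf2, hdropt]
      simp only [pvAR, hb, if_pos]
      rw [hj, if_pos hlast, hdropf2, show i + 1 - i = 1 by omega]
      simp only [List.cons.injEq, List.append_cancel_left_eq, and_true]
      rfl
    · -- flag false: the span continues; use the statement at i+1
      have hb' : ts[i+1] = false := by simpa using hb
      have hj : pvInnerB fs.length ts (i + 1) = pvInnerB fs.length ts (i + 2) :=
        pvInnerB_false _ _ _ hlast (by rw [hget, hb'])
      have ih := pvAR_span fs ts (i + 1) (cur ++ [fs[i]]) hlen hlast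
      rw [show i + 1 + 1 = i + 2 from rfl] at ih
      have hjge : i + 2 <= pvInnerB fs.length ts (i + 2) := pvInnerB_ge _ _ _
      rw [hdropf, hdropt]
      have hstep : pvAR (fs[i] :: fs.drop (i + 1)) (ts[i+1] :: ts.drop (i + 2)) cur
          = pvAR (fs.drop (i + 1)) (ts.drop (i + 2)) (cur ++ [fs[i]]) := by
        rw [hdropf2]; simp [pvAR, hb']
      rw [hstep, ih, hj]
      congr 1
      rw [show pvInnerB fs.length ts (i + 2) - i = (pvInnerB fs.length ts (i + 2) - (i + 1)) + 1
          by omega,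
        List.take_succ_cons]
      simp
  · -- i is the last index: single sentence left, j = i+1 = n
    have hone : fs.drop (i + 1) = [] := List.drop_eq_nil_of_le (by omega)
    have hj : pvInnerB fs.length ts (i + 1) = i + 1 := pvInnerB_stop _ _ _ hlast
    rw [hj, if_neg (by omega), hdropf, hone]
    simp [pvAR, show i + 1 - i = 1 by omega]
termination_by fs.length - i

-- the outer while accumulates exactly pvAR of the remaining suffix
theorem pvOuterB_eq_pvAR (fs : List String) (ts : List Bool) (i : Nat)
    (texts : List (List String)) (hlen : fs.length = ts.length) :
    pvOuterB fs ts fs.length i texts =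
      texts ++ (if i < fs.length then pvAR (fs.drop i) (ts.drop (i + 1)) [] else []) := by
  by_cases h : i < fs.length
  · unfold pvOuterB
    rw [if_pos h]
    rw [pvOuterB_eq_pvAR fs ts _ _ hlen, if_pos h, pvAR_span fs ts i [] hlen h,
      PySem.List.slice_natCast]
    simp
  · unfold pvOuterB
    rw [if_neg h, if_neg h]
    simp
termination_by fs.length - i
decreasing_by have := pvInnerB_ge fs.length ts (i + 1); omega

-- A's foldl over the enumeration of the remaining suffix, started at absolute index k with
-- accumulator acc, appends pvAR of the suffix (flags = text_starts from k+1 on) and empties cur.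
theorem pvA_fold (ts : List Bool) (n : Nat) (hn : ts.length = n) :
    ∀ (rest : List String) (tsuf : List Bool) (k : Nat)
      (acc : List (List String) × List String),
      k + rest.length = n → ts.drop (k + 1) = tsuf → rest ≠ [] →
      (PySem.List.enumerate rest (k : Int)).foldl
        (fun (s : List (List String) × List String) (p : Int × String) =>
          let cur_text := s.2 ++ [p.2]
          if p.1 = (n : Int) - 1 ∨ (PySem.List.pyGet? ts (p.1 + 1)).getD false = true
          then (s.1 ++ [cur_text], ([] : List String)) else (s.1, cur_text)) acc
      = (acc.1 ++ pvAR rest tsuf acc.2, []) := by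
  intro rest
  induction rest with
  | nil => intro tsuf k acc _ _ hne; exact absurd rfl hne
  | cons s rest ih =>
    intro tsuf k acc hlen hdrop _
    rw [PySem.List.enumerate_cons]
    cases rest with
    | nil =>
      have hk : (k : Int) = (n : Int) - 1 := by
        simp at hlen; omega
      simp only [List.foldl_cons, PySem.List.enumerate_nil, List.foldl_nil]
      simp [hk, pvAR]
    | cons s2 rest2 =>
      have hkn : k + 1 < n := by simp at hlen; omega
      have hget : PySem.List.pyGet? ts ((k + 1 : Nat) : Int) = some ts[k + 1] := by
        rw [PySem.List.pyGet?_natCast, List.getElem?_eq_getElem (by omega)]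
      have hne : (k : Int) ≠ (n : Int) - 1 := by omega
      have hdrop' : ts.drop (k + 1 + 1) = tsuf.tail := by rw [← hdrop]; simp
      have htsuf : tsuf = ts[k + 1] :: tsuf.tail := by
        rw [← hdrop, List.tail_drop]
        exact (List.getElem_cons_drop (as := ts) (i := k + 1) (h := by omega)).symm
      simp only [List.foldl_cons]
      rw [show ((k : Int) + 1) = ((k + 1 : Nat) : Int) by push_cast; ring, hget]
      by_cases hb : ts[k + 1] = true
      · have hrec := ih tsuf.tail (k + 1) (acc.1 ++ [acc.2 ++ [s]], [])
          (by simp at hlen ⊢; omega) hdrop' (by simp)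
        simp only [hb, Option.getD_some, or_true, if_pos]
        rw [hrec, htsuf]
        simp [pvAR, hb]
      · simp only [Bool.not_eq_true] at hb
        have hrec := ih tsuf.tail (k + 1) (acc.1, acc.2 ++ [s])
          (by simp at hlen ⊢; omega) hdrop' (by simp)
        simp only [hb, Option.getD_some]
        rw [if_neg (by simp [hne]), hrec, htsuf]
        simp [pvAR, hb]

-- ===== VERDICT (by name: the statement is the Claim_ definition above) =====
theorem reformat_texts_spec : Claim_equal_reformat_texts := by
  intro fs ts _hdom hpre
  unfold Spec_reformat_texts
  unfold Pre_reformat_texts at hpre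
  cases fs with
  | nil =>
    have hts : ts = [] := by simpa using (List.length_eq_zero_iff.mp hpre.symm)
    subst hts
    rw [show reformat_texts_alt [] [] = pvOuterB [] [] ([] : List String).length 0 [] from rfl,
      pvOuterB_eq_pvAR [] [] 0 [] rfl]
    simp [reformat_texts, PySem.List.enumerate]
  | cons s fs' =>
    have hA : reformat_texts (s :: fs') ts = pvAR (s :: fs') (ts.drop 1) [] := by
      unfold reformat_texts
      have hf := pvA_fold ts (s :: fs').length hpre.symm (s :: fs') (ts.drop 1) 0 ([], [])
        (by simp) (by simp) (by simp)
      simp only [Nat.cast_zero] at hf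
      rw [hf]
      simp
    have hB := pvOuterB_eq_pvAR (s :: fs') ts 0 [] hpre
    unfold reformat_texts_alt
    rw [hB, hA]
    simp
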